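-- pv_equiv track=rewrite | github.com/oran123412/git-with-github | python/via_teachers/Dor/workPageDor.py | length
-- ===== SOURCE A (Python) =====
-- def length(growing):
--     prev_string=""
--     for i in growing:
--         current_string=i
--         if len(current_string)>len(prev_string):
--             prev_string=current_string
--             continue
--         else:
--             return ("Not always increasing")
--     return("Always increasing")
-- ===== SOURCE B (Python) =====
-- def length(growing):
--     lens = [len(s) for s in growing]
--     if lens == sorted(set(lens)) and (not lens or lens[0] > 0):
--         return "Always increasing"
--     return "Not always increasing"
-- ===== Notes on version B (the rewrite author's own statement) =====
-- stated objective: alternative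
-- what changed: Replaces the single-pass mutable prev-string scan with an early return by a global sort-and-dedup characterization: the length sequence is strictly increasing iff it equals sorted(set(lengths)) and its first element is positive.
import Mathlib
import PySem

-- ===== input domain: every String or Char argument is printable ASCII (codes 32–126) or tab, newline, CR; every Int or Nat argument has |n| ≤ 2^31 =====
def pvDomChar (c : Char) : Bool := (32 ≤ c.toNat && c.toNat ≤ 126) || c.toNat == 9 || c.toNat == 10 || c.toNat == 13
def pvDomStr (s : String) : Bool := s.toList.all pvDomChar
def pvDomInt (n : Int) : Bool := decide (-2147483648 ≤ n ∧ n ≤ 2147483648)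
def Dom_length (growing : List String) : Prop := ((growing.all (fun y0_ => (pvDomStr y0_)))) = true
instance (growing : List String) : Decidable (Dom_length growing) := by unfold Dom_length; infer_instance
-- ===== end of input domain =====

-- B replaces A's single-pass mutable prev-string scan with an early return by a global
-- sort-and-dedup characterization: strictly increasing iff lens == sorted(set(lens)) and
-- the first length is positive (objective: alternative).

-- ===== PORT A =====
-- the for-loop with mutable prev_string and early return, as structural recursion
def lengthGo (xs : List String) (prev : String) : String :=
  match xs with
  | [] => "Always increasing"
  | i :: rest =>
    let current := i
    if PySem.Str.len current > PySem.Str.len prev then lengthGo rest current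
    else "Not always increasing"

def length (growing : List String) : String := lengthGo growing ""

-- ===== PORT B =====
def length_alt (growing : List String) : String :=
  let lens := growing.map PySem.Str.len
  if lens = PySem.List.sorted (PySem.Set.ofList lens) (fun x => x) false ∧
     (lens = [] ∨ lens.headD 0 > 0)
  then "Always increasing" else "Not always increasing"

-- ===== PRECONDITION & SPEC =====
def Spec_length (growing : List String) (out : String) : Prop := out = length_alt growing
instance (growing : List String) (out : String) : Decidable (Spec_length growing out) := by unfold Spec_length; infer_instance

-- ===== CLAIM (what is proved, stated in full; the proofs are below) =====
def Claim_equal_length : Prop := ∀ (growing : List String), Dom_length growing → Spec_length growing (length growing)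

-- ===== LEMMAS AND PROOFS =====

-- A's scan returns "Always increasing" iff the length chain starting at prev is strict
theorem lengthGo_eq_iff (xs : List String) (prev : String) :
    lengthGo xs prev = "Always increasing" ↔
      List.IsChain (· < ·) ((prev :: xs).map PySem.Str.len) := by
  induction xs generalizing prev with
  | nil => simp [lengthGo]
  | cons x rest ih =>
    simp only [lengthGo, List.map_cons, List.isChain_cons_cons]
    by_cases h : PySem.Str.len x > PySem.Str.len prev
    · rw [if_pos h]
      constructor
      · intro hgo; exact ⟨h, by simpa using (ih x).mp hgo⟩
      · intro hc; exact (ih x).mpr (by simpa using hc.2)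
    · rw [if_neg h]
      constructor
      · intro habs; exact absurd habs (by decide)
      · intro hc; exact absurd hc.1 h

-- B's sorted(set(·)) equality holds iff the length list is strictly increasing
theorem sorted_dedup_iff (lens : List Int) :
    lens = PySem.List.sorted (PySem.Set.ofList lens) (fun x => x) false ↔
      lens.Pairwise (· < ·) := by
  constructor
  · intro h; rw [h]; exact PySem.List.sorted_ofList_pairwise_lt lens
  · intro h
    have hnd : lens.Nodup := h.imp (fun hlt => ne_of_lt hlt)
    rw [PySem.Set.ofList_eq_self_of_nodup _ hnd]
    exact (PySem.List.sorted_eq_of_perm_of_pairwise_lt lens lens (fun x => x) (List.Perm.refl lens) h).symm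

theorem chain_zero_iff (lens : List Int) :
    List.IsChain (· < ·) (0 :: lens) ↔
      lens.Pairwise (· < ·) ∧ (lens = [] ∨ lens.headD 0 > 0) := by
  cases lens with
  | nil => simp
  | cons a t =>
    rw [List.isChain_cons_cons, List.isChain_iff_pairwise]
    constructor
    · intro ⟨h0, hp⟩
      exact ⟨hp, Or.inr h0⟩
    · intro ⟨hp, h⟩
      refine ⟨?_, hp⟩
      rcases h with h | h
      · exact absurd h (by simp)
      · exact h

theorem lens_eq (growing : List String) :
    (("" :: growing).map PySem.Str.len) = 0 :: growing.map PySem.Str.len := by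
  simp [PySem.Str.len]

theorem lengthGo_cases (xs : List String) (prev : String) :
    lengthGo xs prev = "Always increasing" ∨ lengthGo xs prev = "Not always increasing" := by
  induction xs generalizing prev with
  | nil => exact Or.inl rfl
  | cons x rest ih =>
    simp only [lengthGo]
    split
    · exact ih x
    · exact Or.inr rfl

-- ===== VERDICT (by name: the statement is the Claim_ definition above) =====
theorem length_spec : Claim_equal_length := by
  intro growing _
  unfold Spec_length length length_alt
  simp only []
  by_cases hB : (growing.map PySem.Str.len) =
        PySem.List.sorted (PySem.Set.ofList (growing.map PySem.Str.len)) (fun x => x) false ∧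
      ((growing.map PySem.Str.len) = [] ∨ (growing.map PySem.Str.len).headD 0 > 0)
  · rw [if_pos hB]
    have : List.IsChain (· < ·) ((("" : String) :: growing).map PySem.Str.len) := by
      rw [lens_eq]
      exact (chain_zero_iff _).mpr ⟨(sorted_dedup_iff _).mp hB.1, hB.2⟩
    exact (lengthGo_eq_iff growing "").mpr this
  · rw [if_neg hB]
    rcases lengthGo_cases growing "" with h | h
    · exfalso
      have hc := (lengthGo_eq_iff growing "").mp h
      rw [lens_eq] at hc
      have hc := (chain_zero_iff _).mp hc
      exact hB ⟨(sorted_dedup_iff _).mpr hc.1, hc.2⟩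
    · exact h
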